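-- pv_equiv track=rewrite | github.com/blackbird987/birdybot | scripts/smoke_test.py | _find_last_startup
-- ===== SOURCE A (Python) =====
-- def _find_last_startup(lines: list[str]) -> list[str]:
--     """Return log lines from the most recent startup onward.
--
--     Scans backward for 'Bot ready' and then further back to find the
--     process start (PID lock or first log line of that run).
--     """
--     # Find the last "Bot ready" line
--     ready_idx = None
--     for i in range(len(lines) - 1, -1, -1):
--         if "Bot ready" in lines[i]:
--             ready_idx = i
--             break
--
--     if ready_idx is None:
--         # No "Bot ready" found — return all lines (startup may be in progress)
--         return lines
--
--     # Walk backward from ready to find start of this boot (PID lock or start of log)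
--     start_idx = ready_idx
--     for i in range(ready_idx - 1, -1, -1):
--         if "Acquired PID lock" in lines[i] or "Starting bot" in lines[i]:
--             start_idx = i
--             break
--         # Also stop if we hit a PREVIOUS "Bot ready" — that's a different boot
--         if "Bot ready" in lines[i]:
--             start_idx = i + 1
--             break
--         start_idx = i
--
--     return lines[start_idx:]
-- ===== SOURCE B (Python) =====
-- def _find_last_startup(lines: list[str]) -> list[str]:
--     """Single forward pass: track the start of the current boot segment and
--     the start index recorded at the most recent 'Bot ready' line."""
--     current_start = 0
--     last_ready_start = None
--     for i, line in enumerate(lines):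
--         is_boot = "Acquired PID lock" in line or "Starting bot" in line
--         if "Bot ready" in line:
--             last_ready_start = current_start
--             # a line that is also a boot marker starts the next segment itself
--             current_start = i if is_boot else i + 1
--         elif is_boot:
--             current_start = i
--     if last_ready_start is None:
--         return lines
--     return lines[last_ready_start:]
-- ===== Notes on version B (the rewrite author's own statement) =====
-- stated objective: simpler
-- what changed: Replaces A's backward search for the last 'Bot ready' line plus a second backward walk to the boot boundary with a single forward pass that maintains the current boot segment's start and the start recorded at the most recent ready line.
import Mathlib
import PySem

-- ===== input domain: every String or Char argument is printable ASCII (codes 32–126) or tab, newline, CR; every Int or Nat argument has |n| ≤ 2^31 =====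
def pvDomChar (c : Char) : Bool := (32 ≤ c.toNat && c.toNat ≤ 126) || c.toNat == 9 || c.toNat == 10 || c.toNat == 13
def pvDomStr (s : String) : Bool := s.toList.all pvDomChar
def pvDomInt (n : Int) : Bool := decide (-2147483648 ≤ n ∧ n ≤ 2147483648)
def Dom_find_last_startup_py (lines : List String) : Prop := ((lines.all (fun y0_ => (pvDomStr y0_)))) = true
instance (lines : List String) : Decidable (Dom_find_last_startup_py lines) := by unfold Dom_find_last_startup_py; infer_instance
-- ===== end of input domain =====

-- B replaces A's backward ready-search plus backward boundary walk by ONE forward scan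
-- that maintains the current boot segment's start (objective: simpler, one pass).

-- ===== PORT A =====
-- first loop: backward scan for the last "Bot ready" line (break = return some)
def pvReadyScan (lines : List String) : List Int → Option Int
  | [] => none
  | i :: rest =>
    if PySem.Str.isIn "Bot ready" (PySem.List.pyGetD lines i "") then some i
    else pvReadyScan lines rest

-- second loop: walk backward from ready to the start of this boot
def pvWalkBack (lines : List String) : List Int → Int → Int
  | [], start_idx => start_idx
  | i :: rest, _ =>
    let li := PySem.List.pyGetD lines i ""
    if PySem.Str.isIn "Acquired PID lock" li || PySem.Str.isIn "Starting bot" li then i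
    else if PySem.Str.isIn "Bot ready" li then i + 1
    else pvWalkBack lines rest i

def find_last_startup_py (lines : List String) : List String :=
  match pvReadyScan lines (PySem.List.pyRange ((lines.length : Int) - 1) (-1) (-1)) with
  | none => lines
  | some ready_idx =>
    PySem.List.slice lines
      (some (pvWalkBack lines (PySem.List.pyRange (ready_idx - 1) (-1) (-1)) ready_idx)) none

-- ===== PORT B =====
-- loop body of Source B's single forward pass: state = (current_start, last_ready_start)
def pvStep (s : Int × Option Int) (p : Int × String) : Int × Option Int :=
  let isBoot := PySem.Str.isIn "Acquired PID lock" p.2 || PySem.Str.isIn "Starting bot" p.2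
  if PySem.Str.isIn "Bot ready" p.2 then ((if isBoot then p.1 else p.1 + 1), some s.1)
  else if isBoot then (p.1, s.2)
  else s

def find_last_startup_py_alt (lines : List String) : List String :=
  let st := (PySem.List.enumerate lines 0).foldl pvStep (0, none)
  match st.2 with
  | none => lines
  | some k => PySem.List.slice lines (some k) none

-- ===== PRECONDITION & SPEC =====
def Spec_find_last_startup_py (lines : List String) (out : List String) : Prop := out = find_last_startup_py_alt lines
instance (lines : List String) (out : List String) : Decidable (Spec_find_last_startup_py lines out) := by unfold Spec_find_last_startup_py; infer_instance

-- ===== CLAIM (what is proved, stated in full; the proofs are below) =====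
def Claim_equal_find_last_startup_py : Prop := ∀ (lines : List String), Dom_find_last_startup_py lines → Spec_find_last_startup_py lines (find_last_startup_py lines)

-- ===== LEMMAS AND PROOFS =====

-- "Bot ready" / boot-marker tests at index k
def pvP (lines : List String) (k : Nat) : Bool :=
  PySem.Str.isIn "Bot ready" (PySem.List.pyGetD lines (k : Int) "")
def pvS (lines : List String) (k : Nat) : Bool :=
  PySem.Str.isIn "Acquired PID lock" (PySem.List.pyGetD lines (k : Int) "") ||
  PySem.Str.isIn "Starting bot" (PySem.List.pyGetD lines (k : Int) "")

-- forward characterization of A's backward walk: start of the boot segment at position k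
def pvW (lines : List String) : Nat → Int
  | 0 => 0
  | k + 1 => if pvS lines k then (k : Int) else if pvP lines k then (k : Int) + 1 else pvW lines k

-- forward characterization of A's ready search: last "Bot ready" index below k
def pvLR (lines : List String) : Nat → Option Nat
  | 0 => none
  | k + 1 => if pvP lines k then some k else pvLR lines k

theorem pvWalkBack_eq (lines : List String) :
    ∀ k : Nat, pvWalkBack lines (PySem.List.pyRange ((k : Int) - 1) (-1) (-1)) (k : Int) = pvW lines k := by
  intro k
  induction k with
  | zero => rw [PySem.List.pyRange_neg_one_eq_nil (by norm_num)]; rfl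
  | succ k ih =>
    have h1 : ((k + 1 : Nat) : Int) - 1 = (k : Int) := by push_cast; ring
    rw [h1, PySem.List.pyRange_neg_one_cons (by omega)]
    simp only [pvWalkBack, pvW, pvS, pvP]
    split_ifs with hs hp <;> simp_all

theorem pvReadyScan_eq (lines : List String) :
    ∀ k : Nat, pvReadyScan lines (PySem.List.pyRange ((k : Int) - 1) (-1) (-1)) =
      (pvLR lines k).map (fun r => (r : Int)) := by
  intro k
  induction k with
  | zero => rw [PySem.List.pyRange_neg_one_eq_nil (by norm_num)]; rfl
  | succ k ih =>
    have h1 : ((k + 1 : Nat) : Int) - 1 = (k : Int) := by push_cast; ring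
    rw [h1, PySem.List.pyRange_neg_one_cons (by omega)]
    simp only [pvReadyScan, pvLR, pvP]
    split_ifs with hp <;> simp_all

theorem pvScan_inv (lines : List String) :
    ∀ (suf : List String) (k : Nat), suf = lines.drop k → k ≤ lines.length →
      (PySem.List.enumerate suf (k : Int)).foldl pvStep
          (pvW lines k, (pvLR lines k).map (fun r => pvW lines r)) =
        (pvW lines lines.length, (pvLR lines lines.length).map (fun r => pvW lines r)) := by
  intro suf
  induction suf with
  | nil =>
    intro k h hle
    have hk : lines.length ≤ k := List.drop_eq_nil_iff.mp h.symm
    have hk2 : lines.length = k := by omega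
    rw [PySem.List.enumerate_nil, List.foldl_nil, hk2]
  | cons l rest ih =>
    intro k h hle
    have hk : k < lines.length := by
      by_contra hge
      rw [List.drop_eq_nil_iff.mpr (by omega)] at h
      exact List.cons_ne_nil l rest h
    have hget : lines[k]? = some l := by
      have h0 : (lines.drop k)[0]? = some l := by rw [← h]; rfl
      simpa using h0
    have hl : PySem.List.pyGetD lines (k : Int) "" = l := by
      rw [PySem.List.pyGetD_natCast]
      simp [List.getD, hget]
    have hrest : rest = lines.drop (k + 1) := by
      have ht : (lines.drop k).tail = rest := by rw [← h]; rfl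
      rw [← ht, List.tail_drop]
    rw [PySem.List.enumerate_cons, List.foldl_cons]
    have hstep : pvStep (pvW lines k, (pvLR lines k).map (fun r => pvW lines r)) ((k : Int), l) =
        (pvW lines (k + 1), (pvLR lines (k + 1)).map (fun r => pvW lines r)) := by
      simp only [pvStep, pvW, pvLR, pvS, pvP, hl]
      split_ifs <;> simp_all
    rw [hstep]
    have hcast : (k : Int) + 1 = ((k + 1 : Nat) : Int) := by push_cast; ring
    rw [hcast]
    exact ih (k + 1) hrest (by omega)

-- ===== VERDICT (by name: the statement is the Claim_ definition above) =====
theorem find_last_startup_py_spec : Claim_equal_find_last_startup_py := by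
  intro lines _
  unfold Spec_find_last_startup_py find_last_startup_py find_last_startup_py_alt
  have hB : (PySem.List.enumerate lines 0).foldl pvStep (0, none) =
      (pvW lines lines.length, (pvLR lines lines.length).map (fun r => pvW lines r)) := by
    have := pvScan_inv lines lines 0 (by simp) (by omega)
    simpa [pvW, pvLR] using this
  have hA := pvReadyScan_eq lines lines.length
  rw [hB, hA]
  cases hlr : pvLR lines lines.length with
  | none => rfl
  | some r =>
    simp [pvWalkBack_eq lines r]
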